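-- pv_equiv track=rewrite | github.com/cailleanC1C/C1C-Recruitment | packages/c1c-coreops/src/c1c_coreops/help.py | _join_and_truncate
-- ===== SOURCE A (Python) =====
-- from typing import Sequence
--
-- def _join_and_truncate(lines: Sequence[str], limit: int = 900) -> str:
--     if not lines:
--         return "—"
--
--     collected: list[str] = []
--     total = 0
--     for line in lines:
--         text = line.rstrip()
--         addition = len(text) + (1 if collected else 0)
--         if collected and total + addition > limit:
--             remaining = len(lines) - len(collected)
--             if remaining > 0:
--                 collected.append(f"+{remaining} more…")
--             break
--         collected.append(text)
--         total += addition
--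
--     return "\n".join(collected) if collected else "—"
-- ===== SOURCE B (Python) =====
-- from typing import Sequence
--
--
-- def _bisect_right(a, x):
--     # classic bisect_right (CPython algorithm), hand-written since bisect may not be imported
--     lo, hi = 0, len(a)
--     while lo < hi:
--         mid = (lo + hi) // 2
--         if x < a[mid]:
--             hi = mid
--         else:
--             lo = mid + 1
--     return lo
--
--
-- def _join_and_truncate(lines: Sequence[str], limit: int = 900) -> str:
--     texts = [line.rstrip() for line in lines]
--     n = len(texts)
--     if n == 0:
--         return "—"
--     # cum[k] = total length of texts[0..k] joined with "\n" (k separators)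
--     cum = []
--     s = 0
--     for t in texts:
--         s += len(t) + (1 if cum else 0)
--         cum.append(s)
--     # first line is always kept; past that, binary-search the break point
--     cutoff = max(1, _bisect_right(cum, limit))
--     parts = texts[:cutoff]
--     if cutoff < n:
--         parts.append(f"+{n - cutoff} more…")
--     return "\n".join(parts)
-- ===== Notes on version B (the rewrite author's own statement) =====
-- stated objective: alternative
-- what changed: Replaces A's single stateful greedy loop (running total, early break, in-loop marker append) with a table-driven pipeline: map rstrip over all lines, build a prefix-sum table of joined lengths, binary-search (hand-written bisect_right) the cutoff in that sorted table, then slice and append the overflow marker.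
import Mathlib
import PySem

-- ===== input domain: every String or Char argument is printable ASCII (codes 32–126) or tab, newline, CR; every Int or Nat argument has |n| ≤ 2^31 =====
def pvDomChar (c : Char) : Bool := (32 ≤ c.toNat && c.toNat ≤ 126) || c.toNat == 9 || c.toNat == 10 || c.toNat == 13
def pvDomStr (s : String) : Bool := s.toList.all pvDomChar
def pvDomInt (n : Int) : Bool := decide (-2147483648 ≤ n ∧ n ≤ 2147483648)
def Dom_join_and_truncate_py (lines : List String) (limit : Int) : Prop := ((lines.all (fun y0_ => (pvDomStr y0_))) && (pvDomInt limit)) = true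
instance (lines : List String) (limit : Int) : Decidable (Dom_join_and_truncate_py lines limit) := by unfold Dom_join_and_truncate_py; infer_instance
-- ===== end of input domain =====

-- B rebuilds A's greedy break loop as a pipeline: rstrip all lines, a prefix-sum table of joined
-- lengths, a bisect_right cutoff in that table, then slice + overflow marker (objective: alternative).

-- ===== PORT A =====
-- A's for-loop over `lines` with state (collected, total) and an early break.
def joinTruncLoop (limit : Int) (nlines : Int) (rest : List String)
    (collected : List String) (total : Int) : List String :=
  match rest with
  | [] => collected
  | line :: rs =>
    let text := PySem.Str.rstrip line
    let addition := PySem.Str.len text + (if collected ≠ [] then 1 else 0)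
    if collected ≠ [] ∧ total + addition > limit then
      let remaining := nlines - (collected.length : Int)
      if remaining > 0 then
        collected ++ ["+" ++ PySem.Int.toStr remaining ++ " more…"]
      else collected
    else joinTruncLoop limit nlines rs (collected ++ [text]) (total + addition)

def join_and_truncate_py (lines : List String) (limit : Int) : String :=
  if lines = [] then "—"
  else
    let collected := joinTruncLoop limit (lines.length : Int) lines [] 0
    if collected ≠ [] then PySem.Str.join "\n" collected else "—"

-- ===== PORT B =====
-- Source B's prefix-sum loop: `for t in texts: s += len(t) + (1 if cum else 0); cum.append(s)`.
def cumLoop (ts : List String) (s : Int) (cum : List Int) : List Int :=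
  match ts with
  | [] => cum
  | t :: rs =>
    let s' := s + PySem.Str.len t + (if cum ≠ [] then 1 else 0)
    cumLoop rs s' (cum ++ [s'])

-- Source B's hand-written `_bisect_right` is exactly CPython's bisect_right loop, which is
-- PySem.List.bisectRight (the same binary-search algorithm, step for step).
def join_and_truncate_py_alt (lines : List String) (limit : Int) : String :=
  let texts := lines.map PySem.Str.rstrip
  let n : Int := (texts.length : Int)
  if n = 0 then "—"
  else
    let cum := cumLoop texts 0 []
    let cutoff : Int := max 1 ((PySem.List.bisectRight cum limit : Nat) : Int)
    let parts := PySem.List.slice texts none (some cutoff)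
    let parts :=
      if cutoff < n then parts ++ ["+" ++ PySem.Int.toStr (n - cutoff) ++ " more…"]
      else parts
    PySem.Str.join "\n" parts

-- ===== PRECONDITION & SPEC =====
def Spec_join_and_truncate_py (lines : List String) (limit : Int) (out : String) : Prop := out = join_and_truncate_py_alt lines limit
instance (lines : List String) (limit : Int) (out : String) : Decidable (Spec_join_and_truncate_py lines limit out) := by unfold Spec_join_and_truncate_py; infer_instance

-- ===== CLAIM (what is proved, stated in full; the proofs are below) =====
def Claim_equal_join_and_truncate_py : Prop := ∀ (lines : List String) (limit : Int), Dom_join_and_truncate_py lines limit → Spec_join_and_truncate_py lines limit (join_and_truncate_py lines limit)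

-- ===== LEMMAS AND PROOFS =====

-- the marker line
def pvMark (r : Int) : String := "+" ++ PySem.Int.toStr r ++ " more…"

-- proof-side view of A's loop once `collected` is nonempty
def specTail (limit nlines : Int) (clen : Nat) (s : Int) (r : List String) : List String :=
  match r with
  | [] => []
  | t :: rs =>
    let L := PySem.Str.len (PySem.Str.rstrip t)
    if s + L + 1 > limit then
      if nlines - (clen : Int) > 0 then [pvMark (nlines - (clen : Int))] else []
    else PySem.Str.rstrip t :: specTail limit nlines (clen + 1) (s + L + 1) rs

-- proof-side view of the prefix-sum tail (over the rstripped lengths)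
def cumI (s : Int) (ls : List Int) : List Int :=
  match ls with
  | [] => []
  | L :: ls' => (s + L + 1) :: cumI (s + L + 1) ls'

def lensOf (r : List String) : List Int := r.map (fun t => PySem.Str.len (PySem.Str.rstrip t))

lemma joinTruncLoop_eq (limit nlines : Int) (r : List String) :
    ∀ (collected : List String) (s : Int), collected ≠ [] →
      joinTruncLoop limit nlines r collected s
        = collected ++ specTail limit nlines collected.length s r := by
  induction r with
  | nil => intro c s hc; simp [joinTruncLoop, specTail]
  | cons t rs ih =>
    intro c s hc
    simp only [joinTruncLoop, specTail]
    rw [if_pos hc]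
    by_cases h : s + (PySem.Str.len (PySem.Str.rstrip t) + 1) > limit
    · rw [if_pos ⟨hc, h⟩, if_pos (show s + PySem.Str.len (PySem.Str.rstrip t) + 1 > limit by omega)]
      by_cases hr : nlines - (c.length : Int) > 0
      · rw [if_pos hr, if_pos hr]; simp [pvMark]
      · rw [if_neg hr, if_neg hr]; simp
    · rw [if_neg (fun hand => h hand.2),
        if_neg (show ¬ s + PySem.Str.len (PySem.Str.rstrip t) + 1 > limit by omega)]
      rw [ih (c ++ [PySem.Str.rstrip t]) _ (by simp)]
      simp only [List.length_append, List.length_cons, List.length_nil, zero_add,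
        List.append_assoc, List.singleton_append]
      congr 3
      omega

lemma cumLoop_eq (ts : List String) :
    ∀ (cum : List Int) (s : Int), cum ≠ [] →
      cumLoop ts s cum = cum ++ cumI s (ts.map PySem.Str.len) := by
  induction ts with
  | nil => intro c s hc; simp [cumLoop, cumI]
  | cons t rs ih =>
    intro c s hc
    rw [cumLoop]
    simp only [hc, ne_eq, not_false_eq_true, if_true, List.map_cons, cumI]
    rw [ih (c ++ [s + PySem.Str.len t + 1]) _ (by simp)]
    simp

lemma mem_cumI_lt (x : Int) : ∀ (ls : List Int) (s : Int), (∀ L ∈ ls, 0 ≤ L) →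
    x ∈ cumI s ls → s < x := by
  intro ls
  induction ls with
  | nil => intro s _ hx; simp [cumI] at hx
  | cons L ls' ih =>
    intro s hL hx
    simp only [cumI, List.mem_cons] at hx
    have h0 : 0 ≤ L := hL L (by simp)
    rcases hx with h | h
    · omega
    · have := ih (s + L + 1) (fun M hM => hL M (by simp [hM])) h
      omega

lemma cumI_sorted : ∀ (ls : List Int) (s : Int), (∀ L ∈ ls, 0 ≤ L) →
    (s :: cumI s ls).Pairwise (· ≤ ·) := by
  intro ls
  induction ls with
  | nil => intro s _; simp [cumI]
  | cons L ls' ih =>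
    intro s hL
    have h0 : 0 ≤ L := hL L (by simp)
    have htail := ih (s + L + 1) (fun M hM => hL M (by simp [hM]))
    simp only [cumI]
    refine List.pairwise_cons.mpr ⟨?_, htail⟩
    intro y hy
    simp only [List.mem_cons] at hy
    rcases hy with rfl | hy
    · omega
    · have := mem_cumI_lt y ls' (s + L + 1) (fun M hM => hL M (by simp [hM])) hy
      omega

lemma countP_eq_of_cut (x : Int) : ∀ (a : List Int) (k : Nat), k ≤ a.length →
    (∀ j (hj : j < a.length), j < k → a[j] ≤ x) →
    (∀ j (hj : j < a.length), k ≤ j → x < a[j]) →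
    a.countP (fun c => decide (c ≤ x)) = k := by
  intro a
  induction a with
  | nil => intro k hk _ _; simp at hk ⊢; omega
  | cons h t ih =>
    intro k hk h1 h2
    match k with
    | 0 =>
      rw [List.countP_eq_zero.mpr]
      intro y hy
      obtain ⟨j, hj, rfl⟩ := List.mem_iff_getElem.mp hy
      simpa using (h2 j hj (Nat.zero_le j)).not_ge
    | k' + 1 =>
      have hh : h ≤ x := h1 0 (by simp) (by omega)
      rw [List.countP_cons]
      have hrec := ih k' (by simpa using hk)
        (fun j hj hjk => by
          have := h1 (j + 1) (by simpa using Nat.succ_lt_succ hj) (by omega)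
          simpa using this)
        (fun j hj hjk => by
          have := h2 (j + 1) (by simpa using Nat.succ_lt_succ hj) (by omega)
          simpa using this)
      simp [hrec, hh]

lemma lensOf_nonneg (r : List String) : ∀ L ∈ lensOf r, 0 ≤ L := by
  intro L hL
  simp only [lensOf, List.mem_map] at hL
  obtain ⟨t, _, rfl⟩ := hL
  simp [PySem.Str.len_eq]

-- B's tail = greedy spec tail, via the countP characterisation of the cut point
lemma specTail_eq (limit nlines : Int) : ∀ (r : List String) (clen : Nat) (s : Int),
    nlines = (clen : Int) + (r.length : Int) →
    specTail limit nlines clen s r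
      = (r.map PySem.Str.rstrip).take ((cumI s (lensOf r)).countP (fun c => decide (c ≤ limit)))
        ++ (if (clen : Int) + ((cumI s (lensOf r)).countP (fun c => decide (c ≤ limit)) : Int) < nlines
            then [pvMark (nlines - (clen : Int) - ((cumI s (lensOf r)).countP (fun c => decide (c ≤ limit)) : Int))]
            else []) := by
  intro r
  induction r with
  | nil =>
    intro clen s h
    simp only [specTail, lensOf, List.map_nil, cumI, List.countP_nil, List.take_zero,
      List.nil_append, Nat.cast_zero, add_zero]
    rw [if_neg (by simp at h; omega)]
  | cons t rs ih =>
    intro clen s hn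
    have hcum : cumI s (lensOf (t :: rs))
        = (s + PySem.Str.len (PySem.Str.rstrip t) + 1)
          :: cumI (s + PySem.Str.len (PySem.Str.rstrip t) + 1) (lensOf rs) := by
      simp only [lensOf, List.map_cons]; rfl
    set L := PySem.Str.len (PySem.Str.rstrip t) with hL
    by_cases hbr : limit < s + L + 1
    · -- break: the whole table is above the limit, countP = 0
      have hc0 : (cumI s (lensOf (t :: rs))).countP (fun c => decide (c ≤ limit)) = 0 := by
        rw [List.countP_eq_zero]
        intro y hy
        rw [hcum] at hy
        simp only [List.mem_cons] at hy
        have : limit < y := by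
          rcases hy with rfl | hy
          · omega
          · have := mem_cumI_lt y (lensOf rs) (s + L + 1) (lensOf_nonneg rs) hy
            omega
        simpa using this.not_ge
      rw [hc0]
      rw [specTail]
      simp only [← hL, List.take_zero, List.nil_append, Nat.cast_zero, add_zero, sub_zero]
      rw [if_pos (by omega)]
      have hpos : (clen : Int) < nlines := by
        simp only [List.length_cons] at hn; push_cast at hn; omega
      rw [if_pos (by omega), if_pos hpos]
    · -- keep this line, recurse
      have hc : (cumI s (lensOf (t :: rs))).countP (fun c => decide (c ≤ limit))
          = (cumI (s + L + 1) (lensOf rs)).countP (fun c => decide (c ≤ limit)) + 1 := by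
        rw [hcum, List.countP_cons]
        simp [show s + L + 1 ≤ limit by omega]
      rw [hc]
      rw [specTail]
      simp only [← hL]
      rw [if_neg (by omega)]
      rw [ih (clen + 1) (s + L + 1) (by simp only [List.length_cons] at hn; push_cast at hn ⊢; omega)]
      set c := (cumI (s + L + 1) (lensOf rs)).countP (fun c => decide (c ≤ limit)) with hcdef
      simp only [List.map_cons, List.take_succ_cons, List.cons_append]
      congr 2
      · by_cases h : ((clen : Int) + 1 + (c : Int) < nlines)
        · rw [if_pos (by push_cast; omega), if_pos (by push_cast; omega)]
          have : nlines - ((clen + 1 : Nat) : Int) - (c : Int)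
              = nlines - (clen : Int) - (((c + 1 : Nat)) : Int) := by push_cast; ring
          rw [this]
        · rw [if_neg (by push_cast; omega), if_neg (by push_cast; omega)]

lemma bisect_cutoff (cum : List Int) (limit : Int)
    (hs : cum.Pairwise (fun a b => a ≤ b)) :
    PySem.List.bisectRight cum limit = cum.countP (fun c => decide (c ≤ limit)) := by
  obtain ⟨hle, h1, h2⟩ := PySem.List.bisectRight_spec cum limit hs
  exact (countP_eq_of_cut limit cum _ hle h1 h2).symm

-- ===== VERDICT (by name: the statement is the Claim_ definition above) =====
theorem join_and_truncate_py_spec : Claim_equal_join_and_truncate_py := by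
  unfold Claim_equal_join_and_truncate_py
  intro lines limit _
  unfold Spec_join_and_truncate_py
  cases lines with
  | nil => simp [join_and_truncate_py, join_and_truncate_py_alt]
  | cons l0 r =>
    have hcoll : ∀ nl : Int, joinTruncLoop limit nl (l0 :: r) [] 0
        = [PySem.Str.rstrip l0]
          ++ specTail limit nl 1 (PySem.Str.len (PySem.Str.rstrip l0)) r := by
      intro nl
      simp only [joinTruncLoop, ne_eq, not_true_eq_false, false_and, if_false,
        List.nil_append, zero_add, add_zero]
      rw [joinTruncLoop_eq limit nl r [PySem.Str.rstrip l0] _ (by simp)]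
      simp only [List.length_cons, List.length_nil, zero_add]
    have hcum : cumLoop ((l0 :: r).map PySem.Str.rstrip) 0 []
        = PySem.Str.len (PySem.Str.rstrip l0)
          :: cumI (PySem.Str.len (PySem.Str.rstrip l0)) (lensOf r) := by
      simp only [List.map_cons, cumLoop, ne_eq, not_true_eq_false, if_false,
        List.nil_append, zero_add, add_zero]
      rw [cumLoop_eq (r.map PySem.Str.rstrip) _ _ (by simp)]
      have hmaps : (r.map PySem.Str.rstrip).map PySem.Str.len = lensOf r := by
        simp [lensOf, List.map_map, Function.comp]
      rw [hmaps]
      simp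
    set L0 := PySem.Str.len (PySem.Str.rstrip l0) with hL0
    -- A side
    rw [join_and_truncate_py]
    rw [if_neg (by simp)]
    rw [hcoll ((l0 :: r).length : Int)]
    rw [if_pos (by simp)]
    -- B side
    simp only [join_and_truncate_py_alt]
    rw [if_neg (by simp only [List.length_map, List.length_cons]; push_cast; omega)]
    rw [hcum]
    have hsorted : (L0 :: cumI L0 (lensOf r)).Pairwise (fun a b => a ≤ b) :=
      cumI_sorted (lensOf r) L0 (lensOf_nonneg r)
    rw [bisect_cutoff _ limit hsorted]
    set c := (cumI L0 (lensOf r)).countP (fun x => decide (x ≤ limit)) with hc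
    have hcutoff : max 1 (((L0 :: cumI L0 (lensOf r)).countP (fun x => decide (x ≤ limit)) : Nat) : Int)
        = (c : Int) + 1 := by
      rw [List.countP_cons]
      by_cases hfit : L0 ≤ limit
      · simp only [hfit, decide_true, if_true, ← hc]
        push_cast
        omega
      · have hc0 : c = 0 := by
          rw [hc, List.countP_eq_zero]
          intro y hy
          have := mem_cumI_lt y (lensOf r) L0 (lensOf_nonneg r) hy
          simp only [decide_eq_true_eq]
          omega
        simp only [hfit, decide_false, ← hc, hc0]
        simp
    rw [hcutoff]
    rw [PySem.List.slice_to ((l0 :: r).map PySem.Str.rstrip)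
      (show (0:Int) ≤ (c : Int) + 1 by positivity)]
    have htoNat : ((c : Int) + 1).toNat = c + 1 := by omega
    rw [htoNat]
    simp only [List.map_cons, List.take_succ_cons, List.length_cons, List.length_map]
    -- reduce to the tail lists
    rw [specTail_eq limit _ r 1 L0 (by push_cast; ring)]
    rw [← hc]
    congr 1
    simp only [List.cons_append]
    by_cases h : (c : Int) + 1 < ((r.length : Int) + 1)
    · rw [if_pos (by push_cast; omega), if_pos (by push_cast; omega)]
      simp [pvMark]
    · rw [if_neg (by push_cast; omega), if_neg (by push_cast; omega)]
      simp
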